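-- pv_equiv track=rewrite | github.com/gammelalf/modstorage | curselib.py | isversion
-- ===== SOURCE A (Python) =====
-- def isversion(string):
--     '''
--     Check if string has minecraft version's format
--
--     :param string: to check
--     :returns: whether correct format
--     '''
--     for c in string:
--         if c == '.':
--             continue
--         if ord(c) >= ord('0') and ord(c) <= ord('9'):
--             continue
--         else:
--             return False
--     return True
-- ===== SOURCE B (Python) =====
-- def isversion(string):
--     '''
--     Check if string has minecraft version's format
--
--     :param string: to check
--     :returns: whether correct format
--     '''
--     return string.strip('0123456789.') == ''
-- ===== Notes on version B (the rewrite author's own statement) =====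
-- stated objective: idiomatic
-- what changed: Instead of a per-character branch loop with early return, B strips all allowed characters (the ten digits and the dot) from both ends of the string and tests whether the remainder is empty: any disallowed character stops the two-ended stripping, so the remainder is empty exactly when every character is allowed.
import Mathlib
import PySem

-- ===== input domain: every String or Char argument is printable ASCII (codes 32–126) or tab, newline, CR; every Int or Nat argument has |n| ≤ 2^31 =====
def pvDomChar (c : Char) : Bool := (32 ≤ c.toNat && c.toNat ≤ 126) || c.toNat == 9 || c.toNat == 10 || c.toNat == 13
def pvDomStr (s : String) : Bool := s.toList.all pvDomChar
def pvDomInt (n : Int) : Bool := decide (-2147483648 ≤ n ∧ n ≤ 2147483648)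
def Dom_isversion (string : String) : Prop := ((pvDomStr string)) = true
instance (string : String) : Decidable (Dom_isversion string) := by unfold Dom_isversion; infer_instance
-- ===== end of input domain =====

-- B replaces A's per-character validation loop by stripping the allowed characters
-- from both ends and testing for emptiness (idiomatic; same cost).

-- ===== PORT A =====
-- literal port of A's loop: walk the chars, 'continue' on '.', 'continue' on '0'..'9'
-- (via ord comparisons), else return False; after the loop return True
def isversionLoop : List Char → Bool
  | [] => true
  | c :: rest =>
    if c = '.' then isversionLoop rest
    else if c.toNat ≥ '0'.toNat ∧ c.toNat ≤ '9'.toNat then isversionLoop rest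
    else false

def isversion (string : String) : Bool := isversionLoop string.toList

-- ===== PORT B =====
-- literal port of B: string.strip('0123456789.') == ''
def isversion_alt (string : String) : Bool :=
  PySem.Str.stripChars string "0123456789." == ""

-- ===== PRECONDITION & SPEC =====
def Spec_isversion (string : String) (out : Bool) : Prop := out = isversion_alt string
instance (string : String) (out : Bool) : Decidable (Spec_isversion string out) := by unfold Spec_isversion; infer_instance

-- ===== CLAIM (what is proved, stated in full; the proofs are below) =====
def Claim_equal_isversion : Prop := ∀ (string : String), Dom_isversion string → Spec_isversion string (isversion string)

-- ===== LEMMAS AND PROOFS =====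
lemma char_eq_of_toNat (c d : Char) (h : c.toNat = d.toNat) : c = d :=
  Char.ext (UInt32.toNat_inj.mp h)

-- membership in the allowed set '0123456789.' coincides with A's branch condition
lemma contains_allowed_iff (c : Char) :
    ("0123456789.".toList.contains c = true) ↔
      (c = '.' ∨ (c.toNat ≥ '0'.toNat ∧ c.toNat ≤ '9'.toNat)) := by
  have hl : "0123456789.".toList = ['0','1','2','3','4','5','6','7','8','9','.'] := by decide
  rw [hl, List.contains_iff_mem]
  constructor
  · intro h
    fin_cases h <;> decide
  · rintro (rfl | ⟨h1, h2⟩)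
    · decide
    · have h1' : 48 ≤ c.toNat := h1
      have h2' : c.toNat ≤ 57 := h2
      have : c.toNat = 48 ∨ c.toNat = 49 ∨ c.toNat = 50 ∨ c.toNat = 51 ∨ c.toNat = 52 ∨
          c.toNat = 53 ∨ c.toNat = 54 ∨ c.toNat = 55 ∨ c.toNat = 56 ∨ c.toNat = 57 := by omega
      rcases this with h | h | h | h | h | h | h | h | h | h <;>
        first
        | (rw [char_eq_of_toNat c '0' (by rw [h]; decide)]; decide)
        | (rw [char_eq_of_toNat c '1' (by rw [h]; decide)]; decide)
        | (rw [char_eq_of_toNat c '2' (by rw [h]; decide)]; decide)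
        | (rw [char_eq_of_toNat c '3' (by rw [h]; decide)]; decide)
        | (rw [char_eq_of_toNat c '4' (by rw [h]; decide)]; decide)
        | (rw [char_eq_of_toNat c '5' (by rw [h]; decide)]; decide)
        | (rw [char_eq_of_toNat c '6' (by rw [h]; decide)]; decide)
        | (rw [char_eq_of_toNat c '7' (by rw [h]; decide)]; decide)
        | (rw [char_eq_of_toNat c '8' (by rw [h]; decide)]; decide)
        | (rw [char_eq_of_toNat c '9' (by rw [h]; decide)]; decide)

-- A's loop returns true iff every character satisfies its branch condition
lemma isversionLoop_eq_true_iff (l : List Char) :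
    isversionLoop l = true ↔
      ∀ c ∈ l, (c = '.' ∨ (c.toNat ≥ '0'.toNat ∧ c.toNat ≤ '9'.toNat)) := by
  induction l with
  | nil => simp [isversionLoop]
  | cons c rest ih =>
    simp only [isversionLoop, List.mem_cons]
    by_cases h1 : c = '.'
    · simp [h1, ih]
    · by_cases h2 : c.toNat ≥ '0'.toNat ∧ c.toNat ≤ '9'.toNat
      · simp only [if_neg h1, if_pos h2, ih]
        constructor
        · rintro h x (rfl | hx)
          · exact Or.inr h2
          · exact h x hx
        · intro h x hx; exact h x (Or.inr hx)
      · simp only [if_neg h1, if_neg h2]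
        constructor
        · intro h; exact absurd h (by decide)
        · intro h
          rcases h c (Or.inl rfl) with h' | h'
          · exact absurd h' h1
          · exact absurd h' h2

-- stripping the allowed chars from both ends yields [] iff every char is allowed
lemma stripChars_nil_iff (l chars : List Char) :
    (PySem.Chars.stripChars l chars = []) ↔ (∀ c ∈ l, chars.contains c = true) := by
  unfold PySem.Chars.stripChars
  simp only [List.reverse_eq_nil_iff, List.dropWhile_eq_nil_iff, List.mem_reverse]
  constructor
  · intro h c hc
    have hsplit : l = l.takeWhile (fun c => chars.contains c) ++
        l.dropWhile (fun c => chars.contains c) := (List.takeWhile_append_dropWhile).symm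
    rw [hsplit] at hc
    rcases List.mem_append.mp hc with hc | hc
    · exact List.mem_takeWhile_imp hc
    · exact h c hc
  · intro h c hc
    exact h c ((List.dropWhile_sublist _).subset hc)

-- ===== VERDICT (by name: the statement is the Claim_ definition above) =====
theorem isversion_spec : Claim_equal_isversion := by
  intro s _
  unfold Spec_isversion isversion isversion_alt
  rw [Bool.eq_iff_iff, beq_iff_eq, ← String.toList_inj, PySem.Str.toList_stripChars]
  simp only [String.toList_empty]
  rw [isversionLoop_eq_true_iff, stripChars_nil_iff]
  constructor
  · intro h c hc; exact (contains_allowed_iff c).mpr (h c hc)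
  · intro h c hc; exact (contains_allowed_iff c).mp (h c hc)
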